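-- pv_equiv track=rewrite | github.com/ESMValGroup/ESMValTool | esmvaltool/utils/recipe_test_workflow/app/generate_report/bin/generate_html_report.py | process_db_output
-- ===== SOURCE A (Python) =====
-- def process_db_task(task_name, status):
--     """
--     Process db output data for a single task.
--
--     Create a dictionary in the format:
--     ```
--     "process_task": {
--         "status": "succeeded",
--         "style": "color: green"
--     },
--     ```
--
--     Parameters
--     ----------
--     task_name: str
--         The name of the cylc task.
--     status: str
--         The task status.
--
--     Returns
--     -------
--     tuple[str, dict]
--         A tuple containing the name of the recipe as a string and the task data
--         as a dictionary.
--     """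
--     styles = {
--         "succeeded": "color: green",
--         "failed": "color: red",
--     }
--     task_name_parts = task_name.split("_", 1)
--     recipe_name = task_name_parts[1]
--     processed_task_name = task_name_parts[0] + "_task"
--     # Restore directories to a "/"
--     # recipe_name = task_name_parts[1].replace("--", "/")
--     style = styles.get(status, "color: black")
--     task_data = (
--         recipe_name,
--         {processed_task_name: {"status": status, "style": style}},
--     )
--     return task_data
--
-- def process_db_output(report_data):
--     """
--     Process the database output into a dictionary sorted by recipe name.
--
--     Group target tasks by recipe. Filter out other tasks. Remove task prefix
--     and add style information. Sort by recipe name. E.g.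
--     ```
--     {
--         "recipe_name": {
--             "process_task": {
--                 "status": "succeeded",
--                 "style": "color: green"
--             },
--             "compare_task": {
--                 "status": "failed",
--                 "style": "color: red"
--             }
--         }
--     }
--     ```
--
--     Parameters
--     ----------
--     report_data : list
--         The report data fetched from the database. Each item is a tuple
--         containing row data.
--
--     Returns
--     -------
--     dict
--         A dictionary with recipe names as keys and tasks/task data as values.
--     """
--     processed_db_data = {}
--     # A tuple is required for the `startswith` func.
--     tasks_to_include_in_report = ("process", "compare")
--     for task_name, status in report_data:
--         if task_name.startswith(tasks_to_include_in_report):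
--             recipe, task_data = process_db_task(task_name, status)
--             if not processed_db_data.get(recipe):
--                 processed_db_data[recipe] = task_data
--             else:
--                 processed_db_data[recipe].update(task_data)
--     sorted_processed_db_data = dict(sorted(processed_db_data.items()))
--     return sorted_processed_db_data
-- ===== SOURCE B (Python) =====
-- def process_db_output(report_data):
--     """Two staged passes: collect the sorted set of recipe names first, then
--     rescan the rows once per recipe to assemble that recipe's task dict."""
--     styles = {
--         "succeeded": "color: green",
--         "failed": "color: red",
--     }
--     recipes = sorted({name.split("_", 1)[1]
--                       for name, _ in report_data
--                       if name.startswith(("process", "compare"))})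
--     result = {}
--     for recipe in recipes:
--         tasks = {}
--         for name, status in report_data:
--             if name.startswith(("process", "compare")) and name.split("_", 1)[1] == recipe:
--                 tasks[name.split("_", 1)[0] + "_task"] = {
--                     "status": status,
--                     "style": styles.get(status, "color: black"),
--                 }
--         result[recipe] = tasks
--     return result
-- ===== Notes on version B (the rewrite author's own statement) =====
-- stated objective: alternative
-- what changed: B replaces A's single-pass group-into-a-dict-then-sort-keys with two staged passes: it first computes the sorted set of recipe names, then rescans the full row list once per recipe to build that recipe's task dict.
import Mathlib
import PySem

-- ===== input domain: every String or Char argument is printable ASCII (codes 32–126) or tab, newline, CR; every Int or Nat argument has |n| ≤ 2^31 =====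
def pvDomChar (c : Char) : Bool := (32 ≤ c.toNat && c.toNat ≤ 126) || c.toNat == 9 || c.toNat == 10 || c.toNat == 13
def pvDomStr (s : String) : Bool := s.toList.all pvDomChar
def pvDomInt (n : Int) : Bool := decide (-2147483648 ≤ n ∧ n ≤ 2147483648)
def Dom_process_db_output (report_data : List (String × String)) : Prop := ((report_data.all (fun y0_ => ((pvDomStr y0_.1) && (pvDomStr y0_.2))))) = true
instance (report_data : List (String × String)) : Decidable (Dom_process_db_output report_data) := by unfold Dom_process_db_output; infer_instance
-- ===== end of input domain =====

-- B replaces A's single-pass grouping dict with two staged passes (sorted recipe set first,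
-- then one rescan of the rows per recipe); same values, objective: alternative, not faster.

-- ===== PORT A =====
def process_db_task (task_name : String) (status : String) :
    String × PySem.Dict String (List (String × String)) :=
  let styles : PySem.Dict String String :=
    PySem.Dict.ofList [("succeeded", "color: green"), ("failed", "color: red")]
  let task_name_parts := (PySem.Str.splitMax? task_name "_" 1).getD []
  -- task_name_parts[1]: IndexError when task_name has no "_" — excluded by Pre_
  let recipe_name := PySem.List.pyGetD task_name_parts 1 ""
  let processed_task_name := PySem.List.pyGetD task_name_parts 0 "" ++ "_task"
  let style := styles.getD status "color: black"
  (recipe_name,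
   PySem.Dict.ofList [(processed_task_name, [("status", status), ("style", style)])])

def process_db_output (report_data : List (String × String)) :
    List (String × List (String × List (String × String))) :=
  let processed_db_data :=
    report_data.foldl (fun d row =>
      if PySem.Str.startswith row.1 "process" || PySem.Str.startswith row.1 "compare" then
        let rt := process_db_task row.1 row.2
        -- `if not processed_db_data.get(recipe)`: key missing, or its value a falsy (empty) dict
        match d.get? rt.1 with
        | none => d.insert rt.1 rt.2
        | some v =>
          if v.items.isEmpty then d.insert rt.1 rt.2
          else d.insert rt.1 (v.update rt.2.items)   -- processed_db_data[recipe].update(task_data)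
      else d)
      (PySem.Dict.empty : PySem.Dict String (PySem.Dict String (List (String × String))))
  -- keys of the dict are distinct, so Python's sort of the (key, value) items compares keys only
  (PySem.List.sorted processed_db_data.items (fun p => p.1) false).map (fun p => (p.1, p.2.items))

-- ===== PORT B =====
def process_db_output_alt (report_data : List (String × String)) :
    List (String × List (String × List (String × String))) :=
  let styles : PySem.Dict String String :=
    PySem.Dict.ofList [("succeeded", "color: green"), ("failed", "color: red")]
  -- sorted({name.split("_",1)[1] for name, _ in report_data if name.startswith(...)})
  let recipes :=
    PySem.List.sorted
      (PySem.Set.ofList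
        ((report_data.filter (fun row =>
            PySem.Str.startswith row.1 "process" || PySem.Str.startswith row.1 "compare")).map
          (fun row => PySem.List.pyGetD ((PySem.Str.splitMax? row.1 "_" 1).getD []) 1 "")))
      (fun x => x) false
  let result :=
    recipes.foldl (fun res recipe =>
      let tasks :=
        report_data.foldl (fun t row =>
          if (PySem.Str.startswith row.1 "process" || PySem.Str.startswith row.1 "compare")
              && (PySem.List.pyGetD ((PySem.Str.splitMax? row.1 "_" 1).getD []) 1 "" == recipe) then
            t.insert (PySem.List.pyGetD ((PySem.Str.splitMax? row.1 "_" 1).getD []) 0 "" ++ "_task")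
              [("status", row.2), ("style", styles.getD row.2 "color: black")]
          else t)
          (PySem.Dict.empty : PySem.Dict String (List (String × String)))
      res.insert recipe tasks)
      (PySem.Dict.empty : PySem.Dict String (PySem.Dict String (List (String × String))))
  result.items.map (fun p => (p.1, p.2.items))

-- ===== PRECONDITION & SPEC =====
-- Pre_ excludes exactly the inputs on which Python A raises: a task name that passes the
-- "process"/"compare" filter but contains no "_" makes task_name_parts[1] raise IndexError.
def Pre_process_db_output (report_data : List (String × String)) : Prop :=
  ∀ p ∈ report_data,
    (PySem.Str.startswith p.1 "process" || PySem.Str.startswith p.1 "compare") = true →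
    PySem.Str.isIn "_" p.1 = true
instance (report_data : List (String × String)) : Decidable (Pre_process_db_output report_data) := by
  unfold Pre_process_db_output; infer_instance

def pvWitness_process_db_output : (List (String × String)) :=
  [("process_recipe_a", "succeeded"), ("compare_recipe_a", "failed"),
   ("process_recipe_b", "oops"), ("other_task", "succeeded")]

def Spec_process_db_output (report_data : List (String × String)) (out : List (String × List (String × List (String × String)))) : Prop := out = process_db_output_alt report_data
instance (report_data : List (String × String)) (out : List (String × List (String × List (String × String)))) : Decidable (Spec_process_db_output report_data out) := by unfold Spec_process_db_output; infer_instance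

-- ===== CLAIM (what is proved, stated in full; the proofs are below) =====
def Claim_equal_process_db_output : Prop := ∀ (report_data : List (String × String)), Dom_process_db_output report_data → Pre_process_db_output report_data → Spec_process_db_output report_data (process_db_output report_data)

-- ===== LEMMAS AND PROOFS =====

-- the filtered/mapped row a target task contributes: (recipe, processed task name, task data)
def pvRow (row : String × String) : String × String × List (String × String) :=
  let parts := (PySem.Str.splitMax? row.1 "_" 1).getD []
  (PySem.List.pyGetD parts 1 "",
   PySem.List.pyGetD parts 0 "" ++ "_task",
   [("status", row.2),
    ("style", (PySem.Dict.ofList [("succeeded", "color: green"), ("failed", "color: red")] :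
        PySem.Dict String String).getD row.2 "color: black")])

def pvCond (row : String × String) : Bool :=
  PySem.Str.startswith row.1 "process" || PySem.Str.startswith row.1 "compare"

-- the grouping step of A's loop: d[recipe] gets task (r.2.1 ↦ r.2.2) added (last wins)
def pvStep (d : PySem.Dict String (PySem.Dict String (List (String × String))))
    (r : String × String × List (String × String)) :
    PySem.Dict String (PySem.Dict String (List (String × String))) :=
  d.insert r.1 ((d.getD r.1 PySem.Dict.empty).insert r.2.1 r.2.2)

-- A's loop body, on an included row, is exactly the grouping step
lemma pvStepA_eq (d : PySem.Dict String (PySem.Dict String (List (String × String))))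
    (row : String × String) :
    (let rt := process_db_task row.1 row.2
     match d.get? rt.1 with
     | none => d.insert rt.1 rt.2
     | some v =>
       if v.items.isEmpty then d.insert rt.1 rt.2
       else d.insert rt.1 (v.update rt.2.items)) = pvStep d (pvRow row) := by
  show (match d.get? (pvRow row).1 with
     | none => d.insert (pvRow row).1 (PySem.Dict.ofList [((pvRow row).2.1, (pvRow row).2.2)])
     | some v =>
       if v.items.isEmpty then d.insert (pvRow row).1 (PySem.Dict.ofList [((pvRow row).2.1, (pvRow row).2.2)])
       else d.insert (pvRow row).1 (v.update [((pvRow row).2.1, (pvRow row).2.2)])) = pvStep d (pvRow row)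
  rcases h : d.get? (pvRow row).1 with _ | v
  · simp only [pvStep, PySem.Dict.getD_of_get?_eq_none d _ h]
    rfl
  · simp only [pvStep, PySem.Dict.getD_of_get?_eq_some d _ h]
    rcases v with ⟨items⟩
    cases items with
    | nil => rfl
    | cons p rest => rfl

-- A's whole loop is the grouping fold over the filtered, mapped rows
lemma pvA_loop (rd : List (String × String))
    (d : PySem.Dict String (PySem.Dict String (List (String × String)))) :
    rd.foldl (fun d row =>
      if PySem.Str.startswith row.1 "process" || PySem.Str.startswith row.1 "compare" then
        let rt := process_db_task row.1 row.2
        match d.get? rt.1 with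
        | none => d.insert rt.1 rt.2
        | some v =>
          if v.items.isEmpty then d.insert rt.1 rt.2
          else d.insert rt.1 (v.update rt.2.items)
      else d) d
    = ((rd.filter pvCond).map pvRow).foldl pvStep d := by
  induction rd generalizing d with
  | nil => rfl
  | cons row rd ih =>
    by_cases h : pvCond row = true
    · simp only [List.foldl_cons, List.filter_cons, h, if_pos, List.map_cons]
      rw [show (PySem.Str.startswith row.1 "process" || PySem.Str.startswith row.1 "compare") = true from h]
      simp only [if_pos]
      rw [pvStepA_eq d row, ih]
    · simp only [List.foldl_cons, List.filter_cons, h]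
      rw [show (PySem.Str.startswith row.1 "process" || PySem.Str.startswith row.1 "compare") = false from by
        simpa [pvCond] using h]
      simp only [Bool.false_eq_true, if_false, ih]

-- the per-recipe content of the grouping fold: fold over the rows of that recipe only
lemma pvGetD_group (M : List (String × String × List (String × String)))
    (d : PySem.Dict String (PySem.Dict String (List (String × String)))) (c : String) :
    (M.foldl pvStep d).getD c PySem.Dict.empty
    = (M.filter (fun r => r.1 == c)).foldl (fun g r => g.insert r.2.1 r.2.2)
        (d.getD c PySem.Dict.empty) := by
  induction M generalizing d with
  | nil => rfl
  | cons r M ih =>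
    simp only [List.foldl_cons, List.filter_cons, ih]
    by_cases h : r.1 = c
    · simp [pvStep, h]
    · simp [pvStep, h, PySem.Dict.getD_insert, Ne.symm h]

-- B's inner rescan, named (definitionally equal to the fold body in the port of B)
def pvInner (rd : List (String × String)) (c : String) :
    PySem.Dict String (List (String × String)) :=
  rd.foldl (fun t row =>
      if (PySem.Str.startswith row.1 "process" || PySem.Str.startswith row.1 "compare")
          && (PySem.List.pyGetD ((PySem.Str.splitMax? row.1 "_" 1).getD []) 1 "" == c) then
        t.insert (PySem.List.pyGetD ((PySem.Str.splitMax? row.1 "_" 1).getD []) 0 "" ++ "_task")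
          [("status", row.2),
           ("style", (PySem.Dict.ofList [("succeeded", "color: green"), ("failed", "color: red")] :
              PySem.Dict String String).getD row.2 "color: black")]
      else t) PySem.Dict.empty

-- an insert-loop over fresh, distinct keys appends its (key, value) pairs to the items
lemma pvItems_outer (ks : List String)
    (f : String → PySem.Dict String (List (String × String)))
    (d : PySem.Dict String (PySem.Dict String (List (String × String))))
    (hfresh : ∀ c ∈ ks, d.contains c = false) (hnd : ks.Nodup) :
    (ks.foldl (fun res c => res.insert c (f c)) d).items
    = d.items ++ ks.map (fun c => (c, f c)) := by
  induction ks generalizing d with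
  | nil => simp
  | cons c ks ih =>
    rcases List.nodup_cons.mp hnd with ⟨hc, hnd'⟩
    simp only [List.foldl_cons, List.map_cons]
    rw [ih (d.insert c (f c)) ?_ hnd']
    · rw [PySem.Dict.items_insert_of_not_contains d (f c)
        (hfresh c (List.mem_cons_self))]
      simp
    · intro c' hc'
      rw [PySem.Dict.contains_eq_decide_mem_keys, decide_eq_false_iff_not]
      rw [PySem.Dict.mem_keys_insert]
      rintro (rfl | hmem)
      · exact hc hc'
      · have := hfresh c' (List.mem_cons_of_mem _ hc')
        rw [PySem.Dict.contains_eq_decide_mem_keys, decide_eq_false_iff_not] at this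
        exact this hmem

-- B's inner rescan for one recipe c = fold over the filtered, mapped rows of that recipe
lemma pvB_inner (rd : List (String × String)) (c : String)
    (t : PySem.Dict String (List (String × String))) :
    rd.foldl (fun t row =>
      if (PySem.Str.startswith row.1 "process" || PySem.Str.startswith row.1 "compare")
          && (PySem.List.pyGetD ((PySem.Str.splitMax? row.1 "_" 1).getD []) 1 "" == c) then
        t.insert (PySem.List.pyGetD ((PySem.Str.splitMax? row.1 "_" 1).getD []) 0 "" ++ "_task")
          [("status", row.2),
           ("style", (PySem.Dict.ofList [("succeeded", "color: green"), ("failed", "color: red")] :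
              PySem.Dict String String).getD row.2 "color: black")]
      else t) t
    = (((rd.filter pvCond).map pvRow).filter (fun r => r.1 == c)).foldl
        (fun g r => g.insert r.2.1 r.2.2) t := by
  induction rd generalizing t with
  | nil => rfl
  | cons row rd ih =>
    simp only [List.foldl_cons, List.filter_cons]
    by_cases h : pvCond row = true
    · simp only [h, if_pos, List.map_cons, List.filter_cons]
      by_cases hc : (pvRow row).1 = c
      · rw [show ((PySem.Str.startswith row.1 "process" || PySem.Str.startswith row.1 "compare")
            && (PySem.List.pyGetD ((PySem.Str.splitMax? row.1 "_" 1).getD []) 1 "" == c)) = true from by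
              simpa [pvCond, pvRow] using And.intro h hc]
        rw [show ((pvRow row).1 == c) = true from by simpa using hc]
        simp only [if_pos, List.foldl_cons]
        exact ih _
      · rw [show ((PySem.Str.startswith row.1 "process" || PySem.Str.startswith row.1 "compare")
            && (PySem.List.pyGetD ((PySem.Str.splitMax? row.1 "_" 1).getD []) 1 "" == c)) = false from by
              simpa [pvCond, pvRow] using fun _ => hc]
        rw [show ((pvRow row).1 == c) = false from by simpa using hc]
        simp only [Bool.false_eq_true, if_false]
        exact ih t
    · have h' : pvCond row = false := by simpa using h
      rw [show ((PySem.Str.startswith row.1 "process" || PySem.Str.startswith row.1 "compare")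
          && (PySem.List.pyGetD ((PySem.Str.splitMax? row.1 "_" 1).getD []) 1 "" == c)) = false from by
            simp [pvCond] at h'; simp [h']]
      simp only [h', Bool.false_eq_true, if_false]
      exact ih t

-- ===== VERDICT (by name: the statement is the Claim_ definition above) =====
theorem process_db_output_spec : Claim_equal_process_db_output := by
  intro rd _ _
  show process_db_output rd = process_db_output_alt rd
  -- A's side, via pvA_loop
  set R := (rd.filter pvCond).map pvRow with hR
  set d := R.foldl pvStep (PySem.Dict.empty :
    PySem.Dict String (PySem.Dict String (List (String × String)))) with hd
  have hA : process_db_output rd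
      = (PySem.List.sorted d.items (fun p => p.1) false).map (fun p => (p.1, p.2.items)) := by
    show (PySem.List.sorted ((rd.foldl (fun d row =>
      if PySem.Str.startswith row.1 "process" || PySem.Str.startswith row.1 "compare" then
        let rt := process_db_task row.1 row.2
        match d.get? rt.1 with
        | none => d.insert rt.1 rt.2
        | some v =>
          if v.items.isEmpty then d.insert rt.1 rt.2
          else d.insert rt.1 (v.update rt.2.items)
      else d) PySem.Dict.empty).items) (fun p => p.1) false).map (fun p => (p.1, p.2.items)) = _
    rw [pvA_loop]
  -- keys of d: the (deduplicated) recipe list, in first-occurrence order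
  have hkeys : d.keys = PySem.Set.ofList (R.map (fun r => r.1)) := by
    rw [hd]
    exact PySem.Dict.keys_foldl_insert_key R (fun r => r.1)
      (fun d x => (d.getD x.1 PySem.Dict.empty).insert x.2.1 x.2.2) PySem.Dict.empty
  have hnd : d.keys.Nodup := by rw [hkeys]; exact PySem.Set.nodup_ofList _
  -- B's recipe list is sorted(d.keys)
  have hreclist : (rd.filter (fun row =>
        PySem.Str.startswith row.1 "process" || PySem.Str.startswith row.1 "compare")).map
      (fun row => PySem.List.pyGetD ((PySem.Str.splitMax? row.1 "_" 1).getD []) 1 "")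
      = R.map (fun r => r.1) := by
    rw [hR, List.map_map]; rfl
  set recipes := PySem.List.sorted (PySem.Set.ofList (R.map (fun r => r.1))) (fun x => x) false
    with hrec
  have hrecnd : recipes.Nodup :=
    (PySem.List.sorted_perm _ _ _).nodup_iff.mpr (PySem.Set.nodup_ofList _)
  -- B's result dict: fresh distinct keys, so its items are recipes.map (c, group c)
  have hinner : ∀ c, pvInner rd c = d.getD c PySem.Dict.empty := by
    intro c
    show rd.foldl _ PySem.Dict.empty = _
    rw [pvB_inner rd c PySem.Dict.empty, hd, pvGetD_group R PySem.Dict.empty c]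
    rfl
  have hB : process_db_output_alt rd
      = (recipes.map (fun c => (c, d.getD c PySem.Dict.empty))).map
          (fun p => (p.1, p.2.items)) := by
    simp only [process_db_output_alt]
    rw [hreclist, ← hrec]
    show (recipes.foldl (fun res c => res.insert c (pvInner rd c)) PySem.Dict.empty).items.map
        (fun p => (p.1, p.2.items)) = _
    rw [pvItems_outer recipes (pvInner rd) PySem.Dict.empty
      (fun c _ => by simp) hrecnd]
    rw [show (PySem.Dict.empty :
        PySem.Dict String (PySem.Dict String (List (String × String)))).items = [] from rfl]
    rw [List.nil_append]
    congr 1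
    apply List.map_congr_left
    intro c _
    rw [hinner c]
  -- sorting d's items (distinct keys) = mapping the sorted key list
  have hsorted : PySem.List.sorted d.items (fun p => p.1) false
      = recipes.map (fun c => (c, d.getD c PySem.Dict.empty)) := by
    apply PySem.List.sorted_eq_of_perm_of_pairwise_lt
    · rw [PySem.Dict.items_eq_map_keys d hnd PySem.Dict.empty, hkeys]
      exact ((PySem.List.sorted_perm _ _ _).map _)
    · exact List.pairwise_map.mpr (by
        simpa [hrec] using PySem.List.sorted_ofList_pairwise_lt (R.map (fun r => r.1)))
  rw [hA, hB, hsorted]
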